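-- pv_equiv track=rewrite | github.com/Abel-ai-causality/Abel-skills | skills/abel-strategy-discovery/abel_strategy_discovery/narrative_impl.py | latest_row_by_decision
-- ===== SOURCE A (Python) =====
-- def latest_row_by_decision(
--     rows: list[dict[str, str]],
--     decision: str,
-- ) -> dict[str, str] | None:
--     for row in reversed(rows):
--         if row.get("decision") == decision:
--             return row
--     return None
-- ===== SOURCE B (Python) =====
-- def latest_row_by_decision(
--     rows: list[dict[str, str]],
--     decision: str,
-- ) -> dict[str, str] | None:
--     result = None
--     for row in rows:
--         if row.get("decision") == decision:
--             result = row
--     return result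
-- ===== Notes on version B (the rewrite author's own statement) =====
-- stated objective: alternative
-- what changed: Replaces the reverse scan with early return by a single forward pass keeping a 'last match so far' accumulator that is overwritten on each match.
import Mathlib
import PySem

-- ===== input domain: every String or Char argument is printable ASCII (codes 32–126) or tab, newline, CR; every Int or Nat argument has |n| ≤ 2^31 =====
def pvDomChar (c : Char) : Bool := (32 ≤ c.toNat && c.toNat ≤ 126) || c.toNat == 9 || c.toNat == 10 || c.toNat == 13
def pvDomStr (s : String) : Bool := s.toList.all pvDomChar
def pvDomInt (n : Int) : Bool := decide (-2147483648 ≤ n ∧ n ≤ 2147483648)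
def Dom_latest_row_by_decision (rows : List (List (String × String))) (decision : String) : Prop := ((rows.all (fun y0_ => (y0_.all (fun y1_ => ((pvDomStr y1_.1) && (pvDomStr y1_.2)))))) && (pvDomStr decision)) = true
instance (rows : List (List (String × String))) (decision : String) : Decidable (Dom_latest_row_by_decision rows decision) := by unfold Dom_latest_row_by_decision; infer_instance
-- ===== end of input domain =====

-- B replaces A's reverse scan with early return by a forward pass keeping a 'last match' accumulator; same cost, different decomposition.

-- ===== PORT A =====
-- row.get("decision") == decision: .get returns None on a missing key, and None == decision is False
-- for a str decision, so the test is 'lookup returns some decision'.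
def pvRowMatches (row : List (String × String)) (decision : String) : Bool :=
  (PySem.Dict.mk row).get? "decision" == some decision

-- the 'for row in reversed(rows): if …: return row' loop, scanning the reversed list with early return
def pvScanA (l : List (List (String × String))) (decision : String) : Option (List (String × String)) :=
  match l with
  | [] => none
  | row :: rest => if pvRowMatches row decision then some row else pvScanA rest decision

def latest_row_by_decision (rows : List (List (String × String))) (decision : String) : Option (List (String × String)) :=
  pvScanA rows.reverse decision

-- ===== PORT B =====
-- forward loop: result = None; for row in rows: if match then result = row
def latest_row_by_decision_alt (rows : List (List (String × String))) (decision : String) : Option (List (String × String)) :=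
  rows.foldl (fun result row => if pvRowMatches row decision then some row else result) none

-- ===== PRECONDITION & SPEC =====
def Spec_latest_row_by_decision (rows : List (List (String × String))) (decision : String) (out : Option (List (String × String))) : Prop := out = latest_row_by_decision_alt rows decision
instance (rows : List (List (String × String))) (decision : String) (out : Option (List (String × String))) : Decidable (Spec_latest_row_by_decision rows decision out) := by unfold Spec_latest_row_by_decision; infer_instance

-- ===== CLAIM (what is proved, stated in full; the proofs are below) =====
def Claim_equal_latest_row_by_decision : Prop := ∀ (rows : List (List (String × String))) (decision : String), Dom_latest_row_by_decision rows decision → Spec_latest_row_by_decision rows decision (latest_row_by_decision rows decision)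

-- ===== LEMMAS AND PROOFS =====

theorem pvScanA_append (m m' : List (List (String × String))) (decision : String) :
    pvScanA (m ++ m') decision =
      match pvScanA m decision with
      | some r => some r
      | none => pvScanA m' decision := by
  induction m with
  | nil => simp [pvScanA]
  | cons row rest ih =>
      simp only [List.cons_append, pvScanA]
      by_cases h : pvRowMatches row decision
      · simp [h]
      · simp [h, ih]

theorem foldl_eq_scanA_reverse (l : List (List (String × String))) (decision : String)
    (acc : Option (List (String × String))) :
    l.foldl (fun result row => if pvRowMatches row decision then some row else result) acc =
      match pvScanA l.reverse decision with
      | some r => some r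
      | none => acc := by
  induction l generalizing acc with
  | nil => simp [pvScanA]
  | cons row rest ih =>
      simp only [List.foldl_cons, List.reverse_cons]
      rw [ih, pvScanA_append]
      by_cases h : pvRowMatches row decision <;>
        cases hs : pvScanA rest.reverse decision <;> simp [pvScanA, h]

-- ===== VERDICT (by name: the statement is the Claim_ definition above) =====
theorem latest_row_by_decision_spec : Claim_equal_latest_row_by_decision := by
  intro rows decision _
  unfold Spec_latest_row_by_decision latest_row_by_decision latest_row_by_decision_alt
  rw [foldl_eq_scanA_reverse]
  cases pvScanA rows.reverse decision <;> rfl
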